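-- pv_equiv track=rewrite | github.com/sebvoigtlaender/high_precision_real_time_tracking | general_utils.py | len_contiguous_idx_blocks
-- ===== SOURCE A (Python) =====
-- from typing import Any, List, Mapping, MutableMapping, Optional, Tuple, Union
--
-- def len_contiguous_idx_blocks(idx_list: List[int]) -> Tuple[List[int], ...]:
--     '''
--     Return length of contiguous blocks in list of indices idx_list
--
--     Args:
--         idx_list: list of indices
--
--     Returns:
--         len_block_list: list of block lengths
--
--     Example:
--     input = [1, 2, 3, 5, 6]
--     output = [3, 2]
--     '''
--
--     start_idx = idx_list[0]
--     stop_idx = idx_list[0]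
--     len_block_list = []
--
--     for idx in idx_list[1:]:
--         if idx == stop_idx + 1:
--             stop_idx = idx
--             continue
--         elif not idx == stop_idx + 1:
--             len_block_list.append(stop_idx-start_idx+1)
--             start_idx = idx
--             stop_idx = idx
--     if stop_idx == idx_list[-1]:
--         len_block_list.append(stop_idx-start_idx+1)
--     return len_block_list
-- ===== SOURCE B (Python) =====
-- def len_contiguous_idx_blocks(idx_list):
--     # Boundary positions + consecutive differences instead of A's start/stop scan.
--     if not idx_list:
--         return []
--     bounds = [i for i, (prev, cur) in enumerate(zip(idx_list, idx_list[1:]), 1)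
--               if cur != prev + 1]
--     starts = [0] + bounds
--     stops = bounds + [len(idx_list)]
--     return [b - a for a, b in zip(starts, stops)]
-- ===== Notes on version B (the rewrite author's own statement) =====
-- stated objective: alternative
-- what changed: B collects the run-boundary positions in one comprehension and returns the consecutive differences of the boundary-position list (zero, the breakpoints, the length), instead of A's running start/stop scan with a trailing conditional append.
import Mathlib
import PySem

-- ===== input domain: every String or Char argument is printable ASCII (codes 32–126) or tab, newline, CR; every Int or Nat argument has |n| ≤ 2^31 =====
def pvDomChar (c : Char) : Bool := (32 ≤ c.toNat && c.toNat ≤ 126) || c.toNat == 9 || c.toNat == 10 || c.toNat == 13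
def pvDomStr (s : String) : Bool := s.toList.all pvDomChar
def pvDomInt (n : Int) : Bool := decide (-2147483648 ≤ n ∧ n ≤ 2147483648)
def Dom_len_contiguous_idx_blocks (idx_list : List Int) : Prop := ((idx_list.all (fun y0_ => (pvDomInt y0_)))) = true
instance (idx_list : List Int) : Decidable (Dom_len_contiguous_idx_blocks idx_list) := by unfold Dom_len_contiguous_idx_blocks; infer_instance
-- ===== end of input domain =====

-- B replaces A's running start/stop scan by collecting run-boundary positions and
-- taking consecutive differences; equivalence of RETURN values on non-empty lists.

-- ===== PORT A =====
def len_contiguous_idx_blocks (idx_list : List Int) : List Int :=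
  match PySem.List.pyGet? idx_list 0 with
  | none => []   -- Python raises IndexError here (excluded by Pre_)
  | some x =>
    -- for idx in idx_list[1:] with state (start_idx, stop_idx, len_block_list)
    let st := (PySem.List.slice idx_list (some 1) none).foldl
      (fun (s : Int × Int × List Int) idx =>
        if idx = s.2.1 + 1 then (s.1, idx, s.2.2)
        else (idx, idx, s.2.2 ++ [s.2.1 - s.1 + 1]))
      (x, x, ([] : List Int))
    match PySem.List.pyGet? idx_list (-1) with
    | none => st.2.2   -- unreachable on non-empty input
    | some last => if st.2.1 = last then st.2.2 ++ [st.2.1 - st.1 + 1] else st.2.2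

-- ===== PORT B =====
def len_contiguous_idx_blocks_alt (idx_list : List Int) : List Int :=
  match idx_list with
  | [] => []
  | _ :: _ =>
    let bounds := (PySem.List.enumerate (idx_list.zip (idx_list.drop 1)) 1).filterMap
      (fun p => if p.2.2 ≠ p.2.1 + 1 then some p.1 else none)
    let starts := (0 : Int) :: bounds
    let stops := bounds ++ [(idx_list.length : Int)]
    List.zipWith (fun a b => b - a) starts stops

-- ===== PRECONDITION & SPEC =====
-- Pre_ excludes only the empty list, on which A raises IndexError.
def Pre_len_contiguous_idx_blocks (idx_list : List Int) : Prop := idx_list ≠ []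
instance (idx_list : List Int) : Decidable (Pre_len_contiguous_idx_blocks idx_list) := by unfold Pre_len_contiguous_idx_blocks; infer_instance
def pvWitness_len_contiguous_idx_blocks : List Int := [1, 2, 3, 5, 6]

def Spec_len_contiguous_idx_blocks (idx_list : List Int) (out : List Int) : Prop := out = len_contiguous_idx_blocks_alt idx_list
instance (idx_list : List Int) (out : List Int) : Decidable (Spec_len_contiguous_idx_blocks idx_list out) := by unfold Spec_len_contiguous_idx_blocks; infer_instance

-- ===== CLAIM (what is proved, stated in full; the proofs are below) =====
def Claim_equal_len_contiguous_idx_blocks : Prop := ∀ (idx_list : List Int), Dom_len_contiguous_idx_blocks idx_list → Pre_len_contiguous_idx_blocks idx_list → Spec_len_contiguous_idx_blocks idx_list (len_contiguous_idx_blocks idx_list)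
-- ===== LEMMAS AND PROOFS =====

-- common reference: run lengths as counts, scanning with (previous element, current count)
def pvRuns (prev c : Int) : List Int → List Int
  | [] => [c]
  | x :: r => if x = prev + 1 then pvRuns x (c + 1) r else c :: pvRuns x 1 r

-- A's loop body
def pvStepA (s : Int × Int × List Int) (idx : Int) : Int × Int × List Int :=
  if idx = s.2.1 + 1 then (s.1, idx, s.2.2)
  else (idx, idx, s.2.2 ++ [s.2.1 - s.1 + 1])

lemma foldA_stop : ∀ (rest : List Int) (start stop : Int) (acc : List Int),
    (rest.foldl pvStepA (start, stop, acc)).2.1 = rest.getLastD stop := by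
  intro rest
  induction rest with
  | nil => intro start stop acc; rfl
  | cons idx r ih =>
    intro start stop acc
    simp only [List.foldl_cons, List.getLastD_cons, pvStepA]
    split_ifs <;> exact ih _ _ _

lemma foldA_acc : ∀ (rest : List Int) (start stop : Int) (acc : List Int),
    (rest.foldl pvStepA (start, stop, acc)).2.2
      ++ [(rest.foldl pvStepA (start, stop, acc)).2.1 - (rest.foldl pvStepA (start, stop, acc)).1 + 1]
      = acc ++ pvRuns stop (stop - start + 1) rest := by
  intro rest
  induction rest with
  | nil => intro start stop acc; rfl
  | cons idx r ih =>
    intro start stop acc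
    rw [List.foldl_cons]
    by_cases h : idx = stop + 1
    · rw [show pvStepA (start, stop, acc) idx = (start, idx, acc) from by simp [pvStepA, h],
        show pvRuns stop (stop - start + 1) (idx :: r) = pvRuns idx (stop - start + 1 + 1) r from by
          simp [pvRuns, h],
        ih]
      have : idx - start + 1 = stop - start + 1 + 1 := by rw [h]; ring
      rw [this]
    · rw [show pvStepA (start, stop, acc) idx = (idx, idx, acc ++ [stop - start + 1]) from by
          simp [pvStepA, h],
        show pvRuns stop (stop - start + 1) (idx :: r) = (stop - start + 1) :: pvRuns idx 1 r from by
          simp [pvRuns, h],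
        ih]
      have : idx - idx + 1 = (1 : Int) := by ring
      rw [this, List.append_assoc, List.singleton_append]

lemma portA_runs (x : Int) (rest : List Int) :
    len_contiguous_idx_blocks (x :: rest) = pvRuns x 1 rest := by
  unfold len_contiguous_idx_blocks
  rw [PySem.List.pyGet?_zero_cons, PySem.List.slice_from_one, PySem.List.pyGet?_neg_one]
  simp only [List.tail_cons, List.getLast?_cons]
  rw [show (fun (s : Int × Int × List Int) idx =>
        if idx = s.2.1 + 1 then (s.1, idx, s.2.2)
        else (idx, idx, s.2.2 ++ [s.2.1 - s.1 + 1])) = pvStepA from rfl]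
  rw [show rest.getLast?.getD x = rest.getLastD x from List.getLastD_eq_getLast?.symm]
  rw [if_pos (foldA_stop rest x x [])]
  have h := foldA_acc rest x x []
  simp only [List.nil_append] at h
  rw [h]
  have : x - x + 1 = (1 : Int) := by ring
  rw [this]

-- B side
def pvBnds (i prev : Int) : List Int → List Int
  | [] => []
  | x :: r => if x ≠ prev + 1 then i :: pvBnds (i + 1) x r else pvBnds (i + 1) x r

lemma bounds_eq : ∀ (rest : List Int) (prev i : Int),
    (PySem.List.enumerate ((prev :: rest).zip rest) i).filterMap
      (fun p => if p.2.2 = p.2.1 + 1 then none else some p.1)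
      = pvBnds i prev rest := by
  intro rest
  induction rest with
  | nil => intro prev i; rfl
  | cons x r ih =>
    intro prev i
    rw [List.zip_cons_cons, PySem.List.enumerate_cons, List.filterMap_cons]
    by_cases h : x = prev + 1
    · simp [h, pvBnds, ih]
    · simp [h, pvBnds, ih]

def pvDiffs (s : Int) : List Int → List Int
  | [] => []
  | b :: bs => (b - s) :: pvDiffs b bs

lemma zipWith_diffs : ∀ (bs : List Int) (s n : Int),
    List.zipWith (fun a b => b - a) (s :: bs) (bs ++ [n]) = pvDiffs s (bs ++ [n]) := by
  intro bs
  induction bs with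
  | nil => intro s n; rfl
  | cons b bs' ih =>
    intro s n
    simp only [List.cons_append, List.zipWith_cons_cons, pvDiffs]
    rw [← ih b n]

lemma diffs_bnds : ∀ (rest : List Int) (prev i s : Int),
    pvDiffs s (pvBnds i prev rest ++ [i + rest.length]) = pvRuns prev (i - s) rest := by
  intro rest
  induction rest with
  | nil =>
    intro prev i s
    simp only [pvBnds, List.nil_append, List.length_nil, Nat.cast_zero, add_zero, pvDiffs, pvRuns]
  | cons x r ih =>
    intro prev i s
    simp only [pvBnds, pvRuns, List.length_cons]
    by_cases h : x = prev + 1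
    · rw [if_neg (by simp [h]), if_pos h]
      have hlen : i + ((r.length : Int) + 1) = (i + 1) + (r.length : Int) := by ring
      push_cast
      rw [hlen, ih x (i + 1) s]
      have : i + 1 - s = i - s + 1 := by ring
      rw [this]
    · rw [if_pos (by simp [h]), if_neg h]
      simp only [List.cons_append, pvDiffs]
      have hlen : i + (((r.length : Int)) + 1) = (i + 1) + (r.length : Int) := by ring
      push_cast
      rw [hlen, ih x (i + 1) i]
      have : i + 1 - i = 1 := by ring
      rw [this]

lemma portB_runs (x : Int) (rest : List Int) :
    len_contiguous_idx_blocks_alt (x :: rest) = pvRuns x 1 rest := by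
  unfold len_contiguous_idx_blocks_alt
  simp only [List.drop_one, List.tail_cons, ne_eq, ite_not, List.length_cons]
  rw [show (((rest.length + 1 : Nat)) : Int) = 1 + (rest.length : Int) from by push_cast; ring]
  rw [bounds_eq rest x 1, zipWith_diffs, diffs_bnds rest x 1 0]
  norm_num

-- ===== VERDICT (by name: the statement is the Claim_ definition above) =====
theorem len_contiguous_idx_blocks_spec : Claim_equal_len_contiguous_idx_blocks := by
  intro idx_list _ hpre
  unfold Spec_len_contiguous_idx_blocks
  cases idx_list with
  | nil => exact absurd rfl hpre
  | cons x rest => rw [portA_runs, portB_runs]
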